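-- pv_equiv track=rewrite | github.com/mbgurbuz/IDS | check_bruteforce.py | count_pairs_specific
-- ===== SOURCE A (Python) =====
-- def count_pairs_specific(syscalls, a, b):
--     """Count how often a->b vs b->a in window"""
--     ab, ba = 0, 0
--     for i, s in enumerate(syscalls):
--         if s == a:
--             for j in range(i+1, min(i+16, len(syscalls))):
--                 if syscalls[j] == b:
--                     ab += 1
--                     break
--         if s == b:
--             for j in range(i+1, min(i+16, len(syscalls))):
--                 if syscalls[j] == a:
--                     ba += 1
--                     break
--     return ab, ba
-- ===== SOURCE B (Python) =====
-- def count_pairs_specific(syscalls, a, b):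
--     """Count how often a->b vs b->a in window.
--
--     One right-to-left pass keeping the distance to the nearest later
--     occurrence of a and of b, instead of rescanning a forward window.
--     """
--     ab, ba = 0, 0
--     da, db = None, None  # distance to nearest following a / b
--     for s in reversed(syscalls):
--         if da is not None:
--             da += 1
--         if db is not None:
--             db += 1
--         if s == a and db is not None and db <= 15:
--             ab += 1
--         if s == b and da is not None and da <= 15:
--             ba += 1
--         if s == a:
--             da = 0
--         if s == b:
--             db = 0
--     return ab, ba
-- ===== Notes on version B (the rewrite author's own statement) =====
-- stated objective: alternative
-- what changed: Replaces the per-element rescan of a 15-wide forward window with a single right-to-left pass that maintains the distance to the nearest following occurrence of each symbol.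
import Mathlib
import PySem

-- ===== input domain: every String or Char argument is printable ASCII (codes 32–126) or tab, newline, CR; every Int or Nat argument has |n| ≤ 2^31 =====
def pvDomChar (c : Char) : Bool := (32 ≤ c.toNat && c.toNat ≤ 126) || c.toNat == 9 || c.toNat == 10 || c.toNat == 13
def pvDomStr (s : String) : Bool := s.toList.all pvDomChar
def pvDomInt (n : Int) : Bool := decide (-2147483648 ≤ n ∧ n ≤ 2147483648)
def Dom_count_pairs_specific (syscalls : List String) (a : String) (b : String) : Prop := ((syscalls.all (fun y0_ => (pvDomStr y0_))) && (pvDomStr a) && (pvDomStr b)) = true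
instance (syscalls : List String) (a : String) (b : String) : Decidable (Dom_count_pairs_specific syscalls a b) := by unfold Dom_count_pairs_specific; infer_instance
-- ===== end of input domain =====

-- B replaces A's per-element rescan of a 15-wide forward window by one right-to-left
-- pass maintaining the distance to the nearest following occurrence of each symbol (alternative algorithm).

-- ===== PORT A =====
def count_pairs_specific (syscalls : List String) (a : String) (b : String) : Int × Int :=
  (PySem.List.enumerate syscalls).foldl
    (fun (st : Int × Int) (pr : Int × String) =>
      let st :=
        if pr.2 == a then
          if (PySem.List.pyRange (pr.1 + 1) (min (pr.1 + 16) (PySem.List.len syscalls)) 1).any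
              (fun j => PySem.List.pyGet? syscalls j == some b)
          then (st.1 + 1, st.2) else st
        else st
      if pr.2 == b then
        if (PySem.List.pyRange (pr.1 + 1) (min (pr.1 + 16) (PySem.List.len syscalls)) 1).any
            (fun j => PySem.List.pyGet? syscalls j == some a)
        then (st.1, st.2 + 1) else st
      else st)
    (0, 0)

-- ===== PORT B =====
def count_pairs_specific_alt (syscalls : List String) (a : String) (b : String) : Int × Int :=
  let st := syscalls.reverse.foldl
    (fun (st : (Int × Int) × (Option Int × Option Int)) (s : String) =>
      let da := st.2.1.map (· + 1)
      let db := st.2.2.map (· + 1)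
      let ab := if s == a && db.any (fun d => decide (d ≤ 15)) then st.1.1 + 1 else st.1.1
      let ba := if s == b && da.any (fun d => decide (d ≤ 15)) then st.1.2 + 1 else st.1.2
      let da := if s == a then some 0 else da
      let db := if s == b then some 0 else db
      ((ab, ba), (da, db)))
    ((0, 0), (none, none))
  st.1

-- ===== PRECONDITION & SPEC =====
def Spec_count_pairs_specific (syscalls : List String) (a : String) (b : String) (out : Int × Int) : Prop := out = count_pairs_specific_alt syscalls a b
instance (syscalls : List String) (a : String) (b : String) (out : Int × Int) : Decidable (Spec_count_pairs_specific syscalls a b out) := by unfold Spec_count_pairs_specific; infer_instance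

-- ===== CLAIM (what is proved, stated in full; the proofs are below) =====
def Claim_equal_count_pairs_specific : Prop := ∀ (syscalls : List String) (a : String) (b : String), Dom_count_pairs_specific syscalls a b → Spec_count_pairs_specific syscalls a b (count_pairs_specific syscalls a b)

-- ===== LEMMAS AND PROOFS =====

-- the common value both ports compute: per head element, 1 if it equals a and b
-- occurs among the next 15 elements
def pvCnt (a b : String) : List String → Int
  | [] => 0
  | s :: t => (if s == a && (t.take 15).any (· == b) then 1 else 0) + pvCnt a b t

lemma pvTakeAnyFindIdx (p : String → Bool) : ∀ (t : List String) (n : Nat),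
    (t.take n).any p = (t.findIdx? p).any (fun k => decide (k < n)) := by
  intro t
  induction t with
  | nil => intro n; simp
  | cons x r ih =>
    intro n
    cases n with
    | zero => simp [List.findIdx?_cons]
    | succ m =>
      simp [List.findIdx?_cons]
      cases hx : p x with
      | true => simp
      | false =>
        simp [ih m]
        cases List.findIdx? p r <;> simp

lemma pvDistCond (o : Option Nat) :
    ((o.map (fun k => (k : Int))).map (· + 1)).any (fun d => decide (d ≤ 15))
      = o.any (fun k => decide (k < 15)) := by
  cases o <;> simp

lemma pvAltInvariant (a b : String) (l : List String) :
    l.reverse.foldl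
      (fun (st : (Int × Int) × (Option Int × Option Int)) (s : String) =>
        let da := st.2.1.map (· + 1)
        let db := st.2.2.map (· + 1)
        let ab := if s == a && db.any (fun d => decide (d ≤ 15)) then st.1.1 + 1 else st.1.1
        let ba := if s == b && da.any (fun d => decide (d ≤ 15)) then st.1.2 + 1 else st.1.2
        let da := if s == a then some 0 else da
        let db := if s == b then some 0 else db
        ((ab, ba), (da, db)))
      ((0, 0), (none, none))
    = ((pvCnt a b l, pvCnt b a l),
       ((l.findIdx? (· == a)).map (fun k => (k : Int)),
        (l.findIdx? (· == b)).map (fun k => (k : Int)))) := by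
  induction l with
  | nil => simp [pvCnt]
  | cons s t ih =>
    rw [List.reverse_cons, List.foldl_append, ih, List.foldl_cons, List.foldl_nil]
    simp only [pvCnt, List.findIdx?_cons, pvDistCond, pvTakeAnyFindIdx]
    by_cases ha : (s == a) = true <;> by_cases hb : (s == b) = true <;>
      simp [ha, hb] <;>
      cases h1 : List.findIdx? (fun x => x == a) t <;>
      cases h2 : List.findIdx? (fun x => x == b) t <;>
      simp [h1, h2] <;>
      first
        | omega
        | (split <;> omega)

lemma pvWindowGen (x : String) : ∀ (w : Nat) (full : List String) (c : Nat),
    (PySem.List.pyRange ((c : Int)) (min ((c : Int) + (w : Int)) (PySem.List.len full)) 1).any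
        (fun j => PySem.List.pyGet? full j == some x)
      = ((full.drop c).take w).any (· == x) := by
  intro w
  induction w with
  | zero =>
    intro full c
    rw [PySem.List.pyRange_one_eq_nil (by simp [PySem.List.len_eq] <;> omega)]
    simp
  | succ w ih =>
    intro full c
    by_cases hc : c < full.length
    · rw [PySem.List.pyRange_one_cons (by simp [PySem.List.len_eq] <;> omega)]
      rw [List.drop_eq_getElem_cons hc]
      simp only [List.take_succ_cons, List.any_cons]
      have h1 : ((c : Int)) + ((w : Nat) + 1 : Nat) = ((c + 1 : Nat) : Int) + (w : Int) := by
        push_cast; ring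
      rw [show ((c : Int)) + 1 = ((c + 1 : Nat) : Int) by push_cast <;> ring]
      rw [show min ((c : Int) + ((w + 1 : Nat) : Int)) (PySem.List.len full)
            = min (((c + 1 : Nat) : Int) + (w : Int)) (PySem.List.len full) by
        congr 1 <;> push_cast <;> ring]
      rw [ih full (c + 1)]
      simp [PySem.List.pyGet?_natCast, List.getElem?_eq_getElem hc]
    · rw [PySem.List.pyRange_one_eq_nil (by simp [PySem.List.len_eq] <;> omega)]
      rw [List.drop_eq_nil_of_le (by omega)]
      simp

lemma pvAGen (a b : String) (full : List String) : ∀ (t pre : List String) (p q : Int),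
    full = pre ++ t →
    (PySem.List.enumerate t (pre.length : Int)).foldl
      (fun (st : Int × Int) (pr : Int × String) =>
        let st :=
          if pr.2 == a then
            if (PySem.List.pyRange (pr.1 + 1) (min (pr.1 + 16) (PySem.List.len full)) 1).any
                (fun j => PySem.List.pyGet? full j == some b)
            then (st.1 + 1, st.2) else st
          else st
        if pr.2 == b then
          if (PySem.List.pyRange (pr.1 + 1) (min (pr.1 + 16) (PySem.List.len full)) 1).any
              (fun j => PySem.List.pyGet? full j == some a)
          then (st.1, st.2 + 1) else st
        else st)
      (p, q)
    = (p + pvCnt a b t, q + pvCnt b a t) := by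
  intro t
  induction t with
  | nil => intro pre p q hf; simp [PySem.List.enumerate_nil, pvCnt]
  | cons s t' ih =>
    intro pre p q hf
    have hdrop : full.drop (pre.length + 1) = t' := by
      subst hf
      rw [show pre ++ s :: t' = (pre ++ [s]) ++ t' by simp]
      rw [show pre.length + 1 = (pre ++ [s]).length by simp, List.drop_left]
    have hwb := pvWindowGen b 15 full (pre.length + 1)
    have hwa := pvWindowGen a 15 full (pre.length + 1)
    rw [hdrop] at hwb hwa
    have hwbeq : ((PySem.List.pyRange ((pre.length : Int) + 1) (min ((pre.length : Int) + 16) (PySem.List.len full)) 1).any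
        (fun j => PySem.List.pyGet? full j == some b)) = (t'.take 15).any (· == b) := by
      rw [show ((pre.length : Int)) + 16 = ((pre.length + 1 : Nat) : Int) + ((15 : Nat) : Int) by push_cast <;> ring]
      rw [show ((pre.length : Int)) + 1 = ((pre.length + 1 : Nat) : Int) by push_cast <;> ring]
      exact hwb
    have hwaeq : ((PySem.List.pyRange ((pre.length : Int) + 1) (min ((pre.length : Int) + 16) (PySem.List.len full)) 1).any
        (fun j => PySem.List.pyGet? full j == some a)) = (t'.take 15).any (· == a) := by
      rw [show ((pre.length : Int)) + 16 = ((pre.length + 1 : Nat) : Int) + ((15 : Nat) : Int) by push_cast <;> ring]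
      rw [show ((pre.length : Int)) + 1 = ((pre.length + 1 : Nat) : Int) by push_cast <;> ring]
      exact hwa
    have hf' : full = (pre ++ [s]) ++ t' := by rw [hf]; simp
    have ih1 := ih (pre ++ [s])
      (p + (if s == a && (t'.take 15).any (· == b) then 1 else 0))
      (q + (if s == b && (t'.take 15).any (· == a) then 1 else 0)) hf'
    simp only [List.length_append, List.length_cons, List.length_nil, Nat.add_zero] at ih1
    rw [show ((pre.length + 1 : Nat) : Int) = ((pre.length : Int) + 1) by push_cast <;> ring] at ih1
    rw [PySem.List.enumerate_cons]
    simp only [List.foldl_cons, hwbeq, hwaeq]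
    by_cases ha : (s == a) = true <;> by_cases hb2 : (s == b) = true <;>
      by_cases hta : ((t'.take 15).any (· == a)) = true <;>
      by_cases htb : ((t'.take 15).any (· == b)) = true <;>
      simp only [ha, hb2, hta, htb, if_true, if_false, Bool.and_self, Bool.and_true, Bool.and_false,
        Bool.true_and, Bool.false_and, Bool.false_eq_true, ite_true, ite_false] <;>
      · simp only [ha, hb2, hta, htb, Bool.and_true, Bool.and_false, Bool.true_and, Bool.false_and,
          if_true, if_false, Bool.false_eq_true, ite_true, ite_false, add_zero] at ih1
        rw [ih1]
        simp only [pvCnt, ha, hb2, hta, htb, Bool.and_true, Bool.and_false, Bool.true_and,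
          Bool.false_and, Bool.false_eq_true, if_true, if_false, ite_true, ite_false]
        simp only [Prod.mk.injEq]
        constructor <;> ring

lemma pvAEq (syscalls : List String) (a b : String) :
    count_pairs_specific syscalls a b = (pvCnt a b syscalls, pvCnt b a syscalls) := by
  unfold count_pairs_specific
  have h := pvAGen a b syscalls syscalls [] 0 0 rfl
  simpa using h

lemma pvAltEq (syscalls : List String) (a b : String) :
    count_pairs_specific_alt syscalls a b = (pvCnt a b syscalls, pvCnt b a syscalls) := by
  unfold count_pairs_specific_alt
  simp only [pvAltInvariant]

-- ===== VERDICT (by name: the statement is the Claim_ definition above) =====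
theorem count_pairs_specific_spec : Claim_equal_count_pairs_specific := by
  intro syscalls a b _
  unfold Spec_count_pairs_specific
  rw [pvAEq, pvAltEq]
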